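-- pv_equiv track=rewrite | github.com/bfrancisco/comp-prog-files | ICPCRM2023/h3.py | addsub
-- ===== SOURCE A (Python) =====
-- THRESH = 9
--
-- def addsub(x, ex, y, ey, isAdd):
--     if abs(ex-ey) > THRESH:
--         if ex > ey:
--             return x, ex
--         return y, ey
--
--     if ex <= ey:
--         while ex < ey:
--             ey -= 1
--             y *= 10
--     else:
--         while ex > ey:
--             ex -= 1
--             x *= 10
--     return x + isAdd*y, ex
-- ===== SOURCE B (Python) =====
-- THRESH = 9
--
-- def addsub(x, ex, y, ey, isAdd):
--     if abs(ex - ey) > THRESH: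
--         return (x, ex) if ex > ey else (y, ey)
--     if ex <= ey:
--         return x + isAdd * y * 10 ** (ey - ex), ex
--     return x * 10 ** (ex - ey) + isAdd * y, ey
-- ===== Notes on version B (the rewrite author's own statement) =====
-- stated objective: simpler
-- what changed: Each alignment while-loop (repeatedly decrementing the exponent and multiplying by 10) is replaced by one closed-form scaling by 10**d, so B is loop-free.
import Mathlib
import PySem

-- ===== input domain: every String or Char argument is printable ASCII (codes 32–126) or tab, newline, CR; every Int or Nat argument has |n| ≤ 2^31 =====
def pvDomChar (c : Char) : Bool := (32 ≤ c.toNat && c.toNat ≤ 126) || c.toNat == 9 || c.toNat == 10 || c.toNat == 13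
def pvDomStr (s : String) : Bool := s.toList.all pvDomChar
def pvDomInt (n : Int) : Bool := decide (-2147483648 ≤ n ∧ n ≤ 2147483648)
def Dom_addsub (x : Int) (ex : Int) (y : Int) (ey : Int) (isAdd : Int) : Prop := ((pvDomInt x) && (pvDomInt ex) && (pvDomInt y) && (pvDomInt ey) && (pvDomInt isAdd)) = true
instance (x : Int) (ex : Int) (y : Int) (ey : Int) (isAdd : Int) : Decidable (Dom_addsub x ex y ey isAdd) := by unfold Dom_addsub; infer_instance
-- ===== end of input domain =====

-- B replaces each bounded alignment while-loop with one closed-form scaling by 10^d (simpler, loop-free).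


-- ===== PORT A =====
-- while ex < ey: ey -= 1; y *= 10   (returns final (y, ey))
def alignY (ex : Int) (ey : Int) (y : Int) : Int × Int :=
  if _h : ex < ey then alignY ex (ey - 1) (y * 10) else (y, ey)
termination_by (ey - ex).toNat
decreasing_by omega

-- while ex > ey: ex -= 1; x *= 10   (returns final (x, ex))
def alignX (ex : Int) (ey : Int) (x : Int) : Int × Int :=
  if _h : ex > ey then alignX (ex - 1) ey (x * 10) else (x, ex)
termination_by (ex - ey).toNat
decreasing_by omega

def addsub (x : Int) (ex : Int) (y : Int) (ey : Int) (isAdd : Int) : Int × Int :=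
  if |ex - ey| > 9 then
    if ex > ey then (x, ex) else (y, ey)
  else if ex ≤ ey then
    let p := alignY ex ey y
    (x + isAdd * p.1, ex)
  else
    let p := alignX ex ey x
    (p.1 + isAdd * y, p.2)

-- ===== PORT B =====
def addsub_alt (x : Int) (ex : Int) (y : Int) (ey : Int) (isAdd : Int) : Int × Int :=
  if |ex - ey| > 9 then
    if ex > ey then (x, ex) else (y, ey)
  else if ex ≤ ey then
    (x + isAdd * (y * 10 ^ (ey - ex).toNat), ex)
  else
    (x * 10 ^ (ex - ey).toNat + isAdd * y, ey)

-- ===== PRECONDITION & SPEC =====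
def Spec_addsub (x : Int) (ex : Int) (y : Int) (ey : Int) (isAdd : Int) (out : Int × Int) : Prop := out = addsub_alt x ex y ey isAdd
instance (x : Int) (ex : Int) (y : Int) (ey : Int) (isAdd : Int) (out : Int × Int) : Decidable (Spec_addsub x ex y ey isAdd out) := by unfold Spec_addsub; infer_instance

-- ===== CLAIM (what is proved, stated in full; the proofs are below) =====
def Claim_equal_addsub : Prop := ∀ (x : Int) (ex : Int) (y : Int) (ey : Int) (isAdd : Int), Dom_addsub x ex y ey isAdd → Spec_addsub x ex y ey isAdd (addsub x ex y ey isAdd)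

-- ===== LEMMAS AND PROOFS =====
lemma alignY_spec : ∀ (n : Nat) (ex ey y : Int), ex ≤ ey → (ey - ex).toNat = n →
    alignY ex ey y = (y * 10 ^ n, ex) := by
  intro n
  induction n with
  | zero =>
    intro ex ey y hle hn
    have : ey = ex := by omega
    rw [alignY]
    simp [this]
  | succ n ih =>
    intro ex ey y hle hn
    have hlt : ex < ey := by omega
    rw [alignY]
    simp only [hlt, dif_pos]
    rw [ih ex (ey - 1) (y * 10) (by omega) (by omega)]
    rw [pow_succ]
    ring_nf

lemma alignX_spec : ∀ (n : Nat) (ex ey x : Int), ey ≤ ex → (ex - ey).toNat = n →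
    alignX ex ey x = (x * 10 ^ n, ey) := by
  intro n
  induction n with
  | zero =>
    intro ex ey x hle hn
    have : ex = ey := by omega
    rw [alignX]
    simp [this]
  | succ n ih =>
    intro ex ey x hle hn
    have hlt : ex > ey := by omega
    rw [alignX]
    simp only [hlt, dif_pos]
    rw [ih (ex - 1) ey (x * 10) (by omega) (by omega)]
    rw [pow_succ]
    ring_nf

-- ===== VERDICT (by name: the statement is the Claim_ definition above) =====
theorem addsub_spec : Claim_equal_addsub := by
  intro x ex y ey isAdd _
  unfold Spec_addsub addsub addsub_alt
  split_ifs with h1 h2 h3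
  · rfl
  · rfl
  · rw [alignY_spec (ey - ex).toNat ex ey y h3 rfl]
  · rw [alignX_spec (ex - ey).toNat ex ey x (by omega) rfl]
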